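-- pv_equiv track=rewrite | github.com/alexhunsley/thin-files | thinfiles.py | generateFilesPerDayForHalvingPattern
-- ===== SOURCE A (Python) =====
-- def generateFilesPerDayForHalvingPattern(k, extend=False):
--     if k < 1:
--         return []
--
--     filesPerDay = []
--
--     multiple = 1
--
--     while True:
--         filesPerDay += [k] * multiple
--
--         if extend:
--             multiple *= 2
--
--         k //= 2
--         if k == 0:
--             break
--
--     return filesPerDay
-- ===== SOURCE B (Python) =====
-- def generateFilesPerDayForHalvingPattern(k, extend=False):
--     # Recursive formulation: the list for k is k followed by the list for k//2,
--     # with every element of the tail duplicated once when extend is set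
--     # (so a value d levels deep ends up repeated 2**d times, no counter needed).
--     if k < 1:
--         return []
--     tail = generateFilesPerDayForHalvingPattern(k // 2, extend)
--     if extend:
--         tail = [x for x in tail for _ in (0, 1)]
--     return [k] + tail
-- ===== Notes on version B (the rewrite author's own statement) =====
-- stated objective: alternative
-- what changed: Replaces A's iterative while-True loop with its mutated k and doubling 'multiple' counter by a recursion on k//2 that carries no counter at all: the tail list is computed recursively and, when extend is set, each of its elements is duplicated once per recursion level, so the 2^i multiplicities emerge from repeated doubling instead of being tracked.
import Mathlib
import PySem

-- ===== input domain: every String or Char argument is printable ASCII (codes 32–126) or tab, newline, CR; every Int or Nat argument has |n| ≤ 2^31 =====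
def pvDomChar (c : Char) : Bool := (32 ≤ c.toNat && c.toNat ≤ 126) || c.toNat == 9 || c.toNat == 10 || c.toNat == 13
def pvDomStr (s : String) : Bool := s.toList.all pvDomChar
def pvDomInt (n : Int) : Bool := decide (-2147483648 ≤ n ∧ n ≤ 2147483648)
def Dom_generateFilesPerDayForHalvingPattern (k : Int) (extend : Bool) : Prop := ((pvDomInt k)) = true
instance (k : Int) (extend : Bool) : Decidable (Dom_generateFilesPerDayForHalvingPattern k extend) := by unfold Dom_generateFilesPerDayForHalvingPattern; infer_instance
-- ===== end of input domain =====

-- ===== PORT A =====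
-- B replaces A's while-loop with its doubling 'multiple' counter by a counter-free
-- recursion on k//2 that duplicates the recursive tail when extend is set (alternative decomposition).
-- Loop of A; fuel bounds the iteration count (k.toNat suffices for k ≥ 1), otherwise a literal transcription.
def pvLoopA (extend : Bool) : Nat → Int → Nat → List Int → List Int
  | 0, _, _, acc => acc
  | fuel+1, k, multiple, acc =>
    let acc' := acc ++ List.replicate multiple k
    let multiple' := if extend then multiple * 2 else multiple
    let k' := PySem.Int.floordiv k 2
    if k' = 0 then acc' else pvLoopA extend fuel k' multiple' acc'

def generateFilesPerDayForHalvingPattern (k : Int) (extend : Bool) : List Int :=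
  if k < 1 then [] else pvLoopA extend k.toNat k 1 []

-- ===== PORT B =====
def generateFilesPerDayForHalvingPattern_alt (k : Int) (extend : Bool) : List Int :=
  if k < 1 then []
  else
    let tail := generateFilesPerDayForHalvingPattern_alt (PySem.Int.floordiv k 2) extend
    -- '[x for x in tail for _ in (0, 1)]' = duplicate each element once
    let tail := if extend then tail.flatMap (fun x => [x, x]) else tail
    k :: tail
termination_by k.toNat
decreasing_by
  rename_i h
  rw [PySem.Int.floordiv_eq_ediv_of_pos (by omega : (0:Int) < 2)]
  omega

-- ===== PRECONDITION & SPEC =====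
def Spec_generateFilesPerDayForHalvingPattern (k : Int) (extend : Bool) (out : List Int) : Prop := out = generateFilesPerDayForHalvingPattern_alt k extend
instance (k : Int) (extend : Bool) (out : List Int) : Decidable (Spec_generateFilesPerDayForHalvingPattern k extend out) := by unfold Spec_generateFilesPerDayForHalvingPattern; infer_instance

-- ===== CLAIM (what is proved, stated in full; the proofs are below) =====
def Claim_equal_generateFilesPerDayForHalvingPattern : Prop := ∀ (k : Int) (extend : Bool), Dom_generateFilesPerDayForHalvingPattern k extend → Spec_generateFilesPerDayForHalvingPattern k extend (generateFilesPerDayForHalvingPattern k extend)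

-- ===== LEMMAS AND PROOFS =====

-- replicating each element of a doubled list m times = replicating the original 2m times
theorem flatMap_replicate_dup (l : List Int) (m : Nat) :
    (l.flatMap (fun x => [x, x])).flatMap (List.replicate m) =
      l.flatMap (List.replicate (m * 2)) := by
  induction l with
  | nil => simp
  | cons x xs ih =>
    simp [List.flatMap_cons, ih]
    rw [show m * 2 = m + m by omega, List.replicate_add, List.append_assoc]

-- A's loop with current multiple m produces B's recursive list, each element replicated m times
theorem pvLoopA_eq_alt (extend : Bool) (fuel : Nat) :
    ∀ (k : Int) (m : Nat) (acc : List Int), 1 ≤ k → k.toNat ≤ fuel →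
      pvLoopA extend fuel k m acc =
        acc ++ (generateFilesPerDayForHalvingPattern_alt k extend).flatMap (List.replicate m) := by
  induction fuel with
  | zero => intro k m acc hk hf; omega
  | succ fuel ih =>
    intro k m acc hk hf
    have h2 : PySem.Int.floordiv k 2 = k / 2 := PySem.Int.floordiv_eq_ediv_of_pos (by omega)
    rw [generateFilesPerDayForHalvingPattern_alt]
    rw [if_neg (by omega : ¬ k < 1)]
    by_cases hz : PySem.Int.floordiv k 2 = 0
    · -- k = 1: last iteration of the loop; B's tail is []
      have hk1 : k = 1 := by rw [h2] at hz; omega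
      subst hk1
      simp [pvLoopA, generateFilesPerDayForHalvingPattern_alt]
    · have hd1 : 1 ≤ PySem.Int.floordiv k 2 := by rw [h2] at *; omega
      have hdf : (PySem.Int.floordiv k 2).toNat ≤ fuel := by
        rw [h2]; rw [h2] at hz
        have : k / 2 < k := by omega
        omega
      show (if PySem.Int.floordiv k 2 = 0 then _ else
          pvLoopA extend fuel (PySem.Int.floordiv k 2) _ _) = _
      rw [if_neg hz,
        ih (PySem.Int.floordiv k 2) (if extend then m * 2 else m)
          (acc ++ List.replicate m k) hd1 hdf]
      cases extend with
      | false => simp [List.flatMap_cons]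
      | true => simp [List.flatMap_cons, flatMap_replicate_dup]

-- ===== VERDICT (by name: the statement is the Claim_ definition above) =====
theorem generateFilesPerDayForHalvingPattern_spec : Claim_equal_generateFilesPerDayForHalvingPattern := by
  intro k extend _
  unfold Spec_generateFilesPerDayForHalvingPattern
  unfold generateFilesPerDayForHalvingPattern
  by_cases hk : k < 1
  · rw [generateFilesPerDayForHalvingPattern_alt]; simp [hk]
  · rw [if_neg hk, pvLoopA_eq_alt extend k.toNat k 1 [] (by omega) (le_refl _)]
    have : ∀ l : List Int, l.flatMap (List.replicate 1) = l := by
      intro l; induction l with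
      | nil => simp
      | cons x xs ih => simp [List.flatMap_cons, ih]
    rw [this]; simp
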